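-- pv_equiv track=rewrite | github.com/borat14011-sudo/wom-polymarket-strategy | polymarket_bot/market_scanner.py | extract_token_ids
-- ===== SOURCE A (Python) =====
-- from typing import Dict, List, Optional, Tuple
--
-- def extract_token_ids(market: Dict) -> Tuple[Optional[str], Optional[str]]:
--     """Extract YES and NO token IDs from a market"""
--     yes_token_id = None
--     no_token_id = None
--
--     if 'tokens' in market:
--         for token in market['tokens']:
--             if token.get('outcome') == 'YES':
--                 yes_token_id = token.get('token_id')
--             elif token.get('outcome') == 'NO':
--                 no_token_id = token.get('token_id')
--
--     return yes_token_id, no_token_id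
-- ===== SOURCE B (Python) =====
-- def extract_token_ids(market):
--     """Extract YES and NO token IDs from a market"""
--     def find(outcome, tokens):
--         for t in tokens:
--             if t.get('outcome') == outcome:
--                 return t.get('token_id')
--         return None
--     rev = list(reversed(market.get('tokens', [])))
--     return find('YES', rev), find('NO', rev)
-- ===== Notes on version B (the rewrite author's own statement) =====
-- stated objective: alternative
-- what changed: Replaces A's single forward pass with two overwriting accumulator variables by reversing the token list once and doing two independent early-exit first-match searches (first match from the back = last occurrence).
import Mathlib
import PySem

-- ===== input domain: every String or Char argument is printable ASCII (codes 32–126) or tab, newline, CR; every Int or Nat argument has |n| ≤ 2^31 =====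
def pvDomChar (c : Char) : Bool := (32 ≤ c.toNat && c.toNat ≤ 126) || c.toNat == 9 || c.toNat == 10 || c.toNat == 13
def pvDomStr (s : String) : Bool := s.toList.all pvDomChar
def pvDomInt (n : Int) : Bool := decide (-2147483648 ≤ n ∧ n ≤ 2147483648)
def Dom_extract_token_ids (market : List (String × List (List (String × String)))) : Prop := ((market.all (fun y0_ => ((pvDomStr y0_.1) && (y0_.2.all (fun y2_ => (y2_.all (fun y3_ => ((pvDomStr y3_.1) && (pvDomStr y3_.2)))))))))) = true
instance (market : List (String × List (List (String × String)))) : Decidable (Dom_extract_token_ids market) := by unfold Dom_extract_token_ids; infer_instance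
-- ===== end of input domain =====

-- B reverses the token list once and runs two independent early-exit first-match searches
-- (first match from the back = A's last-occurrence-wins); objective: alternative decomposition.

-- ===== PORT A =====
def extract_token_ids (market : List (String × List (List (String × String)))) : Option String × Option String :=
  let init : Option String × Option String := (none, none)
  if (PySem.Dict.mk market).contains "tokens" then
    ((PySem.Dict.mk market).getD "tokens" []).foldl
      (fun st token =>
        if (PySem.Dict.mk token).get? "outcome" == some "YES" then
          ((PySem.Dict.mk token).get? "token_id", st.2)
        else if (PySem.Dict.mk token).get? "outcome" == some "NO" then
          (st.1, (PySem.Dict.mk token).get? "token_id")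
        else st) init
  else init

-- ===== PORT B =====
-- B's helper 'find': first token (early exit) whose outcome equals the target
def pvFind (outcome : String) : List (List (String × String)) → Option String
  | [] => none
  | t :: ts =>
    if (PySem.Dict.mk t).get? "outcome" == some outcome then (PySem.Dict.mk t).get? "token_id"
    else pvFind outcome ts

def extract_token_ids_alt (market : List (String × List (List (String × String)))) : Option String × Option String :=
  let rev := ((PySem.Dict.mk market).getD "tokens" []).reverse
  (pvFind "YES" rev, pvFind "NO" rev)

-- ===== PRECONDITION & SPEC =====
def Spec_extract_token_ids (market : List (String × List (List (String × String)))) (out : Option String × Option String) : Prop := out = extract_token_ids_alt market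
instance (market : List (String × List (List (String × String)))) (out : Option String × Option String) : Decidable (Spec_extract_token_ids market out) := by unfold Spec_extract_token_ids; infer_instance

-- ===== CLAIM (what is proved, stated in full; the proofs are below) =====
def Claim_equal_extract_token_ids : Prop := ∀ (market : List (String × List (List (String × String)))), Dom_extract_token_ids market → Spec_extract_token_ids market (extract_token_ids market)

-- ===== LEMMAS AND PROOFS =====

-- A's forward overwriting fold (from the fixed start (none,none)) equals B's pair of
-- first-match searches over the reversed list; snoc induction on the token list.
lemma pv_fold_eq_find (tokens : List (List (String × String))) :
    tokens.foldl
      (fun st token =>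
        if (PySem.Dict.mk token).get? "outcome" == some "YES" then
          ((PySem.Dict.mk token).get? "token_id", st.2)
        else if (PySem.Dict.mk token).get? "outcome" == some "NO" then
          (st.1, (PySem.Dict.mk token).get? "token_id")
        else st) (none, none)
    = (pvFind "YES" tokens.reverse, pvFind "NO" tokens.reverse) := by
  induction tokens using List.reverseRecOn with
  | nil => simp [pvFind]
  | append_singleton ts t ih =>
    rw [List.foldl_append, ih]
    simp only [List.foldl_cons, List.foldl_nil, List.reverse_append, List.reverse_singleton,
      List.singleton_append]
    by_cases hy : (PySem.Dict.mk t).get? "outcome" == some "YES"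
    · have hn : ¬ ((PySem.Dict.mk t).get? "outcome" == some "NO") := by
        simp_all
      simp [pvFind, hy, hn]
    · by_cases hn : (PySem.Dict.mk t).get? "outcome" == some "NO"
      · simp [pvFind, hy, hn]
      · simp [pvFind, hy, hn]

-- ===== VERDICT (by name: the statement is the Claim_ definition above) =====
theorem extract_token_ids_spec : Claim_equal_extract_token_ids := by
  intro market _
  unfold Spec_extract_token_ids extract_token_ids extract_token_ids_alt
  by_cases hc : (PySem.Dict.mk market).contains "tokens"
  · simp only [hc, if_pos]
    exact pv_fold_eq_find _
  · simp only [hc, Bool.false_eq_true, if_neg, not_false_iff]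
    simp only [Bool.not_eq_true] at hc
    rw [PySem.Dict.getD_of_not_contains _ _ hc]
    simp [pvFind]
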